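-- pv_equiv track=rewrite | github.com/apprenti-org/curriculum-tracking | scripts/generate-course-overview.py | words_match
-- ===== SOURCE A (Python) =====
-- def normalize_match_words(words):
--     result = set()
--     for w in words:
--         if w == 'intro':
--             result.add('introduction'); result.add('intro')
--         elif w == 'introduction':
--             result.add('introduction'); result.add('intro')
--         else:
--             result.add(w)
--     return result
--
-- def words_match(title_words, file_words):
--     tw = normalize_match_words(title_words)
--     fw = normalize_match_words(file_words)
--     overlap = len(tw & fw)
--     if overlap >= min(len(title_words), len(file_words), 2) or \
--        (len(title_words) == 1 and title_words <= fw) or \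
--        (len(file_words) == 1 and file_words <= tw):
--         return True
--     tw_list = list(title_words)
--     for fw_word in file_words:
--         for i in range(len(tw_list)):
--             for j in range(len(tw_list)):
--                 if i != j:
--                     if tw_list[i] + tw_list[j] == fw_word:
--                         compound_overlap = overlap + 2
--                         if compound_overlap >= min(len(title_words), len(file_words), 2):
--                             return True
--     fw_list = list(file_words)
--     for tw_word in title_words:
--         for i in range(len(fw_list)):
--             for j in range(len(fw_list)):
--                 if i != j:
--                     if fw_list[i] + fw_list[j] == tw_word:
--                         compound_overlap = overlap + 2
--                         if compound_overlap >= min(len(title_words), len(file_words), 2):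
--                             return True
--     return False
-- ===== SOURCE B (Python) =====
-- def _normalize(words):
--     result = set(words)
--     if 'intro' in result or 'introduction' in result:
--         result |= {'intro', 'introduction'}
--     return result
--
-- def _has_concat(words, parts):
--     # does some word in `words` split into two distinct words of the set `parts`?
--     for w in words:
--         for k in range(len(w) + 1):
--             l, r = w[:k], w[k:]
--             if l != r and l in parts and r in parts:
--                 return True
--     return False
--
-- def words_match(title_words, file_words):
--     tw = _normalize(title_words)
--     fw = _normalize(file_words)
--     if len(tw & fw) >= min(len(title_words), len(file_words), 2):
--         return True
--     return _has_concat(file_words, title_words) or _has_concat(title_words, file_words)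
-- ===== Notes on version B (the rewrite author's own statement) =====
-- stated objective: alternative
-- what changed: A's two triple-nested distinct-index concatenation loops are replaced by a split scan (each candidate word is split at every position and both halves looked up in the other side's word set); the normalization is restated as a conditional set union, and the redundant single-word subset checks and always-true compound_overlap bookkeeping are dropped.
import Mathlib
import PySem

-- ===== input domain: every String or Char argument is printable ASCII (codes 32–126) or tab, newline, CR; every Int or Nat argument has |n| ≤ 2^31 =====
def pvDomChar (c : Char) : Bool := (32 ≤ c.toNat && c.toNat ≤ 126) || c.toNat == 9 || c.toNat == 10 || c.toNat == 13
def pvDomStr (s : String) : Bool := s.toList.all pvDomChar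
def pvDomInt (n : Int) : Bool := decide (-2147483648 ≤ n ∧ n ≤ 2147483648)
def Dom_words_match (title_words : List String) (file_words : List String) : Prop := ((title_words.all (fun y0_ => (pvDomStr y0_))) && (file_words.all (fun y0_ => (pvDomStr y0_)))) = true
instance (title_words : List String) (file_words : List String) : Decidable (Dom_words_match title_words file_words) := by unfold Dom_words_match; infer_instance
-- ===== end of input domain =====

-- B replaces A's quadratic distinct-index concatenation double-loops by a split scan of each candidate
-- word against the other side's word set, and drops the (provably redundant) single-word subset checks
-- and the always-true compound_overlap bookkeeping (objective: alternative algorithm).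
-- Both arguments are Python sets (distinct elements); iteration order over them never affects either
-- result (set-building, len, and symmetric existential searches only), so the ports use the list order.

-- ===== PORT A =====
-- normalize_match_words: fold of Python's for-loop over a PySem.Set accumulator
def normalize_match_words (words : List String) : PySem.Set String :=
  words.foldl (fun result w =>
    if w == "intro" then PySem.Set.add (PySem.Set.add result "introduction") "intro"
    else if w == "introduction" then PySem.Set.add (PySem.Set.add result "introduction") "intro"
    else PySem.Set.add result w) PySem.Set.empty

-- words_match: the three-way 'or' condition ('title_words <= fw' is set inclusion), then the two
-- triple-nested index loops over tw_list = list(title_words) / fw_list = list(file_words).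
def words_match (title_words : List String) (file_words : List String) : Bool :=
  let tw := normalize_match_words title_words
  let fw := normalize_match_words file_words
  let overlap : Int := PySem.Set.len (PySem.Set.inter tw fw)
  let m : Int := min (min (PySem.List.len title_words) (PySem.List.len file_words)) 2
  if overlap ≥ m
      || (PySem.List.len title_words == 1 && PySem.Set.issubset title_words fw)
      || (PySem.List.len file_words == 1 && PySem.Set.issubset file_words tw) then
    true
  else
    let tw_list := title_words
    if file_words.any (fun fw_word =>
        (PySem.List.pyRange 0 (PySem.List.len tw_list) 1).any (fun i =>
          (PySem.List.pyRange 0 (PySem.List.len tw_list) 1).any (fun j =>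
            decide (i ≠ j)
            && (PySem.List.pyGetD tw_list i "" ++ PySem.List.pyGetD tw_list j "" == fw_word)
            && decide (overlap + 2 ≥ m)))) then
      true
    else
      let fw_list := file_words
      if title_words.any (fun tw_word =>
          (PySem.List.pyRange 0 (PySem.List.len fw_list) 1).any (fun i =>
            (PySem.List.pyRange 0 (PySem.List.len fw_list) 1).any (fun j =>
              decide (i ≠ j)
              && (PySem.List.pyGetD fw_list i "" ++ PySem.List.pyGetD fw_list j "" == tw_word)
              && decide (overlap + 2 ≥ m)))) then
        true
      else
        false

-- ===== PORT B =====
def normalize_alt (words : List String) : PySem.Set String :=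
  let result := PySem.Set.ofList words
  if PySem.Set.contains result "intro" || PySem.Set.contains result "introduction" then
    PySem.Set.update result ["intro", "introduction"]
  else
    result

-- does some word in `words` split into two distinct words of the set `parts`?
def has_concat (words : List String) (parts : List String) : Bool :=
  words.any (fun w =>
    (PySem.List.pyRange 0 (PySem.Str.len w + 1) 1).any (fun k =>
      let l := PySem.Str.slice w none (some k)
      let r := PySem.Str.slice w (some k) none
      decide (l ≠ r) && PySem.Set.contains parts l && PySem.Set.contains parts r))

def words_match_alt (title_words : List String) (file_words : List String) : Bool :=
  let tw := normalize_alt title_words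
  let fw := normalize_alt file_words
  if PySem.Set.len (PySem.Set.inter tw fw)
      ≥ min (min (PySem.List.len title_words) (PySem.List.len file_words)) 2 then
    true
  else
    has_concat file_words title_words || has_concat title_words file_words

-- ===== PRECONDITION & SPEC =====
-- Pre_ only states the type convention for the set[str] parameters: each List String encodes a Python
-- set, i.e. holds distinct elements. It excludes no input the Python function accepts.
def Pre_words_match (title_words : List String) (file_words : List String) : Prop :=
  title_words.Nodup ∧ file_words.Nodup

instance (title_words : List String) (file_words : List String) : Decidable (Pre_words_match title_words file_words) := by
  unfold Pre_words_match; infer_instance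

def pvWitness_words_match : List String × List String := (["data", "intro"], ["introduction", "notes"])

def Spec_words_match (title_words : List String) (file_words : List String) (out : Bool) : Prop := out = words_match_alt title_words file_words
instance (title_words : List String) (file_words : List String) (out : Bool) : Decidable (Spec_words_match title_words file_words out) := by unfold Spec_words_match; infer_instance

-- ===== CLAIM (what is proved, stated in full; the proofs are below) =====
def Claim_equal_words_match : Prop := ∀ (title_words : List String) (file_words : List String), Dom_words_match title_words file_words → Pre_words_match title_words file_words → Spec_words_match title_words file_words (words_match title_words file_words)

-- ===== LEMMAS AND PROOFS =====

-- membership in A's normalized set (auxiliary, with a generalized accumulator)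
theorem mem_norm_aux (ws : List String) (r : PySem.Set String) (y : String) :
    y ∈ ws.foldl (fun result w =>
      if w == "intro" then PySem.Set.add (PySem.Set.add result "introduction") "intro"
      else if w == "introduction" then PySem.Set.add (PySem.Set.add result "introduction") "intro"
      else PySem.Set.add result w) r ↔
      y ∈ r ∨ ∃ w ∈ ws, (if w = "intro" ∨ w = "introduction"
        then y = "intro" ∨ y = "introduction" else y = w) := by
  induction ws generalizing r with
  | nil => simp
  | cons h t ih =>
    simp only [List.foldl_cons, ih]
    by_cases h1 : h = "intro" <;> by_cases h2 : h = "introduction" <;>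
      simp_all [PySem.Set.mem_add] <;> aesop

theorem mem_normalize_match_words (ws : List String) (y : String) :
    y ∈ normalize_match_words ws ↔
      y ∈ ws ∨ ((y = "intro" ∨ y = "introduction") ∧ ("intro" ∈ ws ∨ "introduction" ∈ ws)) := by
  rw [normalize_match_words, mem_norm_aux]
  constructor
  · rintro (h | ⟨w, hw, hcond⟩)
    · simp at h
    · by_cases hi : w = "intro" ∨ w = "introduction"
      · simp only [hi, if_pos] at hcond
        exact Or.inr ⟨hcond, by rcases hi with rfl | rfl; exacts [Or.inl hw, Or.inr hw]⟩
      · simp only [hi, if_neg, not_false_iff] at hcond; subst hcond; exact Or.inl hw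
  · rintro (h | ⟨hy, hw⟩)
    · refine Or.inr ⟨y, h, ?_⟩; split <;> simp_all
    · rcases hw with hw | hw
      · exact Or.inr ⟨"intro", hw, by simp [hy]⟩
      · exact Or.inr ⟨"introduction", hw, by simp [hy]⟩

theorem nodup_normalize_match_words (ws : List String) : (normalize_match_words ws).Nodup := by
  rw [normalize_match_words]
  generalize hr : (PySem.Set.empty : PySem.Set String) = r
  have hrn : r.Nodup := by rw [← hr]; exact List.nodup_nil
  clear hr
  induction ws generalizing r with
  | nil => exact hrn
  | cons h t ih =>
    simp only [List.foldl_cons]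
    split <;> try split
    all_goals exact ih _ (by repeat apply PySem.Set.nodup_add; try assumption)

theorem mem_normalize_alt (ws : List String) (y : String) :
    y ∈ normalize_alt ws ↔
      y ∈ ws ∨ ((y = "intro" ∨ y = "introduction") ∧ ("intro" ∈ ws ∨ "introduction" ∈ ws)) := by
  rw [normalize_alt]
  split
  · next h =>
    simp only [Bool.or_eq_true, PySem.Set.contains_iff, PySem.Set.mem_ofList] at h
    simp only [PySem.Set.mem_update, PySem.Set.mem_ofList]
    aesop
  · next h =>
    simp only [Bool.or_eq_true, PySem.Set.contains_iff, PySem.Set.mem_ofList] at h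
    simp only [PySem.Set.mem_ofList]
    aesop

theorem nodup_normalize_alt (ws : List String) : (normalize_alt ws).Nodup := by
  rw [normalize_alt]
  split
  · exact PySem.Set.nodup_update _ _ (PySem.Set.nodup_ofList ws)
  · exact PySem.Set.nodup_ofList ws

-- the two overlap counts agree
theorem overlap_eq (t f : List String) :
    PySem.Set.len (PySem.Set.inter (normalize_match_words t) (normalize_match_words f))
      = PySem.Set.len (PySem.Set.inter (normalize_alt t) (normalize_alt f)) := by
  have hperm : (PySem.Set.inter (normalize_match_words t) (normalize_match_words f)).Perm
      (PySem.Set.inter (normalize_alt t) (normalize_alt f)) := by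
    rw [List.perm_ext_iff_of_nodup
      (PySem.Set.nodup_inter _ _ (nodup_normalize_match_words t))
      (PySem.Set.nodup_inter _ _ (nodup_normalize_alt t))]
    intro a
    simp only [PySem.Set.mem_inter, mem_normalize_match_words, mem_normalize_alt]
  simp only [PySem.Set.len, hperm.length_eq]

-- a word of t lying in f's normalized set yields a shared normalized word, hence positive overlap
theorem overlap_pos_of_mem (t f : List String) (x : String) (hx : x ∈ t)
    (hxf : x ∈ normalize_match_words f) :
    0 < PySem.Set.len (PySem.Set.inter (normalize_match_words t) (normalize_match_words f)) := by
  rw [PySem.Set.len]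
  rw [show ((0 : Int) < _ ↔ _) from Int.natCast_pos, List.length_pos_iff_exists_mem]
  refine ⟨x, ?_⟩
  rw [PySem.Set.mem_inter, mem_normalize_match_words]
  exact ⟨Or.inl hx, hxf⟩

theorem slice_take (w : String) (k : Int) (hk : 0 ≤ k) :
    (PySem.Str.slice w none (some k)).toList = w.toList.take k.toNat := by
  rw [PySem.Str.toList_slice, PySem.Chars.slice_eq_listSlice, PySem.List.slice_to _ hk]

theorem slice_drop (w : String) (k : Int) (hk : 0 ≤ k) :
    (PySem.Str.slice w (some k) none).toList = w.toList.drop k.toNat := by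
  rw [PySem.Str.toList_slice, PySem.Chars.slice_eq_listSlice, PySem.List.slice_from _ hk]

-- a pair of words at distinct positions of a duplicate-free list concatenating to w
-- ↔ a split of w into two distinct parts of the list
theorem concat_pair_iff_split (xs : List String) (hnd : xs.Nodup) (w : String) :
    (∃ i j, ∃ (_ : i < xs.length) (_ : j < xs.length), i ≠ j ∧ xs[i] ++ xs[j] = w)
      ↔ ∃ k : Int, 0 ≤ k ∧ k < (w.toList.length : Int) + 1 ∧
          PySem.Str.slice w none (some k) ≠ PySem.Str.slice w (some k) none ∧
          PySem.Str.slice w none (some k) ∈ xs ∧ PySem.Str.slice w (some k) none ∈ xs := by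
  constructor
  · rintro ⟨i, j, hi, hj, hij, hcat⟩
    have hw : w.toList = xs[i].toList ++ xs[j].toList := by
      rw [← hcat, String.toList_append]
    refine ⟨(xs[i].toList.length : Int), by positivity, by rw [hw]; simp, ?_⟩
    have hl : PySem.Str.slice w none (some (xs[i].toList.length : Int)) = xs[i] := by
      apply String.toList_inj.mp
      rw [slice_take _ _ (by positivity), hw, Int.toNat_natCast, List.take_left]
    have hr : PySem.Str.slice w (some (xs[i].toList.length : Int)) none = xs[j] := by
      apply String.toList_inj.mp
      rw [slice_drop _ _ (by positivity), hw, Int.toNat_natCast, List.drop_left]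
    rw [hl, hr]
    have hne : xs[i] ≠ xs[j] := by
      intro heq
      exact hij ((List.Nodup.getElem_inj_iff hnd).mp heq)
    exact ⟨hne, List.getElem_mem hi, List.getElem_mem hj⟩
  · rintro ⟨k, hk0, hklt, hne, hl, hr⟩
    have hw : PySem.Str.slice w none (some k) ++ PySem.Str.slice w (some k) none = w := by
      apply String.toList_inj.mp
      rw [String.toList_append, slice_take _ _ hk0, slice_drop _ _ hk0, List.take_append_drop]
    obtain ⟨i, hi, hgi⟩ := List.mem_iff_getElem.mp hl
    obtain ⟨j, hj, hgj⟩ := List.mem_iff_getElem.mp hr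
    refine ⟨i, j, hi, hj, ?_, by rw [hgi, hgj, hw]⟩
    rintro rfl; exact hne (hgi ▸ hgj ▸ rfl)

-- A's triple loop equals B's split scan (the compound_overlap test is vacuous: m ≤ 2 ≤ overlap + 2)
theorem loop_eq_has_concat (words parts : List String) (hnd : parts.Nodup) (overlap m : Int)
    (h0 : 0 ≤ overlap) (hm : m ≤ 2) :
    (words.any (fun w =>
      (PySem.List.pyRange 0 (PySem.List.len parts) 1).any (fun i =>
        (PySem.List.pyRange 0 (PySem.List.len parts) 1).any (fun j =>
          decide (i ≠ j)
          && (PySem.List.pyGetD parts i "" ++ PySem.List.pyGetD parts j "" == w)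
          && decide (overlap + 2 ≥ m)))))
      = has_concat words parts := by
  rw [has_concat]
  apply PySem.List.any_congr_mem
  intro w _
  have hcomp : decide (overlap + 2 ≥ m) = true := by simp; omega
  rw [Bool.eq_iff_iff]
  simp only [List.any_eq_true, PySem.List.mem_pyRange_one, hcomp, Bool.and_true,
    Bool.and_eq_true, decide_eq_true_eq, beq_iff_eq, PySem.List.len_eq,
    PySem.Set.contains_eq_listContains, List.contains_eq_mem,
    PySem.Str.len_eq, ge_iff_le]
  constructor
  · rintro ⟨i, ⟨hi0, hilt⟩, j, ⟨hj0, hjlt⟩, hij, hcat⟩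
    have hiN : i.toNat < parts.length := by omega
    have hjN : j.toNat < parts.length := by omega
    rw [PySem.List.pyGetD_eq_getElem parts "" hi0 (by omega),
        PySem.List.pyGetD_eq_getElem parts "" hj0 (by omega)] at hcat
    have := (concat_pair_iff_split parts hnd w).mp
      ⟨i.toNat, j.toNat, hiN, hjN, by omega, hcat⟩
    obtain ⟨k, hk0, hklt, hne, h1, h2⟩ := this
    exact ⟨k, ⟨hk0, by omega⟩, ⟨hne, by simpa using h1⟩, by simpa using h2⟩
  · rintro ⟨k, ⟨hk0, hklt⟩, ⟨hne, h1⟩, h2⟩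
    have := (concat_pair_iff_split parts hnd w).mpr
      ⟨k, hk0, by omega, hne, by simpa using h1, by simpa using h2⟩
    obtain ⟨i, j, hi, hj, hij, hcat⟩ := this
    refine ⟨(i : Int), ⟨by omega, by omega⟩, (j : Int), ⟨by omega, by omega⟩, by omega, ?_⟩
    rw [PySem.List.pyGetD_eq_getElem parts "" (by omega) (by omega),
        PySem.List.pyGetD_eq_getElem parts "" (by omega) (by omega)]
    simpa using hcat

-- ===== VERDICT (by name: the statement is the Claim_ definition above) =====
theorem words_match_spec : Claim_equal_words_match := by
  intro t f _ hpre
  obtain ⟨hndt, hndf⟩ := hpre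
  unfold Spec_words_match words_match words_match_alt
  dsimp only
  rw [← overlap_eq t f]
  have h0 : (0 : Int) ≤ PySem.Set.len
      (PySem.Set.inter (normalize_match_words t) (normalize_match_words f)) := by
    rw [PySem.Set.len]; positivity
  have hlen_t : PySem.List.len t = (t.length : Int) := PySem.List.len_eq t
  have hlen_f : PySem.List.len f = (f.length : Int) := PySem.List.len_eq f
  have hmle : min (min (PySem.List.len t) (PySem.List.len f)) 2 ≤ (2 : Int) := min_le_right _ _
  generalize hgov : PySem.Set.len (PySem.Set.inter (normalize_match_words t) (normalize_match_words f)) = ov at *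
  by_cases hc1 : ov ≥ min (min (PySem.List.len t) (PySem.List.len f)) 2
  · rw [hlen_t, hlen_f] at hc1
    rcases (by omega : (t.length : Int) ≤ ov ∨ (f.length : Int) ≤ ov ∨ (2 : Int) ≤ ov) with h | h | h <;>
      simp [h]
  · have hc1' := hc1
    rw [hlen_t, hlen_f] at hc1'
    have hp2 : t.length = 1 → ∃ x ∈ t, x ∉ normalize_match_words f := by
      intro h1
      by_contra hx
      push Not at hx
      obtain ⟨a, ha⟩ : ∃ a, a ∈ t := by
        cases t with
        | nil => simp at h1
        | cons a _ => exact ⟨a, List.mem_cons_self ..⟩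
      have := overlap_pos_of_mem t f a ha (hx a ha)
      rw [hgov] at this
      rw [h1] at hc1'
      push_cast at hc1'
      omega
    have hp3 : f.length = 1 → ∃ x ∈ f, x ∉ normalize_match_words t := by
      intro h1
      by_contra hx
      push Not at hx
      obtain ⟨b, hb⟩ : ∃ b, b ∈ f := by
        cases f with
        | nil => simp at h1
        | cons b _ => exact ⟨b, List.mem_cons_self ..⟩
      have := overlap_pos_of_mem f t b hb (hx b hb)
      have hcomm : PySem.Set.len (PySem.Set.inter (normalize_match_words f) (normalize_match_words t)) = ov := by
        rw [← hgov]
        have hperm : (PySem.Set.inter (normalize_match_words f) (normalize_match_words t)).Perm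
            (PySem.Set.inter (normalize_match_words t) (normalize_match_words f)) := by
          rw [List.perm_ext_iff_of_nodup
            (PySem.Set.nodup_inter _ _ (nodup_normalize_match_words f))
            (PySem.Set.nodup_inter _ _ (nodup_normalize_match_words t))]
          intro a
          simp only [PySem.Set.mem_inter]
          tauto
        simp only [PySem.Set.len, hperm.length_eq]
      rw [hcomm] at this
      rw [h1] at hc1'
      push_cast at hc1'
      omega
    rw [loop_eq_has_concat f t hndt ov _ h0 hmle, loop_eq_has_concat t f hndf ov _ h0 hmle,
      if_neg hc1]
    cases has_concat f t <;> cases has_concat t f <;> simp <;>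
      exact ⟨⟨by omega, hp2⟩, hp3⟩
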